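-- pv_equiv track=rewrite | github.com/fspv/learning | l33tcode/palindrome-pairs.py | palindromes_till_the_end
-- ===== SOURCE A (Python) =====
-- from typing import List, Dict, Tuple, Set
--
-- def manacher(array: List[str], left_offset: int) -> List[bool]:
--     left, right = 0, -1
--     cache = [0] * len(array)
--     result = [False] * (len(array) + 1)
--     result[-1] = True
--
--     for pos in range(len(array)):
--         radius = (
--             1 - left_offset
--             if pos > right
--             else min(cache[left + right - (pos - left_offset)] + 1, right - pos + 1)
--         )
--
--         while (
--             0 <= pos - left_offset - radius
--             and pos + radius < len(array)
--             and array[pos - left_offset - radius] == array[pos + radius]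
--         ):
--             radius += 1
--
--         radius -= 1
--
--         cache[pos] = radius
--
--         if pos + radius == len(array) - 1:
--             result[pos - left_offset - radius] = True
--
--         if pos + radius > right:
--             left = pos - left_offset - radius
--             right = pos + radius
--
--     return result
--
-- def palindromes_till_the_end(
--     array: List[str],
-- ) -> Tuple[List[List[bool]], List[List[bool]]]:
--     result_lr: List[List[bool]] = []
--     result_rl: List[List[bool]] = []
--
--     for word in array:
--         result_lr.append(
--             list(
--                 map(
--                     lambda x: any(x),
--                     zip(manacher(list(word), 0), manacher(list(word), 1)),
--                 )
--             )
--         )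
--         result_rl.append(
--             list(
--                 map(
--                     lambda x: any(x),
--                     zip(
--                         manacher(list(reversed(word)), 0),
--                         manacher(list(reversed(word)), 1),
--                     ),
--                 )
--             )
--         )
--
--     return result_lr, result_rl
-- ===== SOURCE B (Python) =====
-- from typing import List, Tuple
--
-- def _mask(chars: List[str]) -> List[bool]:
--     return [chars[i:] == chars[i:][::-1] for i in range(len(chars) + 1)]
--
-- def palindromes_till_the_end(
--     array: List[str],
-- ) -> Tuple[List[List[bool]], List[List[bool]]]:
--     result_lr = [_mask(list(word)) for word in array]
--     result_rl = [_mask(list(reversed(word))) for word in array]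
--     return result_lr, result_rl
-- ===== Notes on version B (the rewrite author's own statement) =====
-- stated objective: simpler
-- what changed: Replaces the Manacher radius computation (center loop with radius cache and left/right window, run twice per word and OR-merged by parity) with a direct check, for each suffix start i, that word[i:] equals its reverse.
import Mathlib
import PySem

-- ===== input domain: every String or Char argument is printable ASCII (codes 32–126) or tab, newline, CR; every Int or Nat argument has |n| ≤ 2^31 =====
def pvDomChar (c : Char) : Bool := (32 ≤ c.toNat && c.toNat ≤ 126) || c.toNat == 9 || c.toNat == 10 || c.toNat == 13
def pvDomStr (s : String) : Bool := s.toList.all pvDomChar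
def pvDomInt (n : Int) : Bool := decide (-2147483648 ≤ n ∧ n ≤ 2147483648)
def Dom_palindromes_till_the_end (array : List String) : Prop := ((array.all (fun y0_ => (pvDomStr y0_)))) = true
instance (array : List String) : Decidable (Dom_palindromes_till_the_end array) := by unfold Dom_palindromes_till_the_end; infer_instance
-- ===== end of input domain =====

-- B replaces A's Manacher radius computation by direct per-suffix palindrome checks: simpler, same return value.

-- ===== PORT A =====
-- condition of manacher's inner `while` (bounds short-circuit before the character comparison, as in Python)
abbrev mOk (c : List Char) (off pos r : Int) : Prop :=
  0 ≤ pos - off - r ∧ pos + r < (c.length : Int) ∧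
    PySem.List.pyGet? c (pos - off - r) = PySem.List.pyGet? c (pos + r)

-- the `while` loop: keep incrementing `radius` while the characters around the center match
def manExtend (c : List Char) (off pos r : Int) : Int :=
  if mOk c off pos r then manExtend c off pos (r + 1) else r
termination_by ((c.length : Int) - (pos + r)).toNat
decreasing_by
  rename_i h; obtain ⟨-, h2, -⟩ := h; omega

-- loop state: (left, right, cache, result)
structure MState where
  left : Int
  right : Int
  cache : List Int
  result : List Bool

-- one iteration of manacher's `for pos in range(len(array))` body
-- (the cache lookup uses pyGetD: the index is always in range when called from the entry point, see inv_step below)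
def manStep (c : List Char) (off : Int) (pos : Nat) (s : MState) : MState :=
  let r0 : Int :=
    if (pos : Int) > s.right then 1 - off
    else min (PySem.List.pyGetD s.cache (s.left + s.right - ((pos : Int) - off)) 0 + 1)
             (s.right - (pos : Int) + 1)
  let radius := manExtend c off pos r0 - 1
  let cache := PySem.List.pySetD s.cache (pos : Int) radius
  let result :=
    if (pos : Int) + radius = (c.length : Int) - 1 then
      PySem.List.pySetD s.result ((pos : Int) - off - radius) true
    else s.result
  if (pos : Int) + radius > s.right then
    ⟨(pos : Int) - off - radius, (pos : Int) + radius, cache, result⟩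
  else ⟨s.left, s.right, cache, result⟩

def manGo (c : List Char) (off : Int) (pos : Nat) (s : MState) : MState :=
  if pos < c.length then manGo c off (pos + 1) (manStep c off pos s) else s
termination_by c.length - pos

def manacher (c : List Char) (off : Int) : List Bool :=
  (manGo c off 0
      ⟨0, -1, List.replicate c.length 0,
        PySem.List.pySetD (List.replicate (c.length + 1) false) (-1) true⟩).result

def palindromes_till_the_end (array : List String) : List (List Bool) × List (List Bool) :=
  (array.map (fun w => ((manacher w.toList 0).zip (manacher w.toList 1)).map (fun x => x.1 || x.2)),
   array.map (fun w =>
     ((manacher w.toList.reverse 0).zip (manacher w.toList.reverse 1)).map (fun x => x.1 || x.2)))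

-- ===== PORT B =====
def palMask (c : List Char) : List Bool :=
  (List.range (c.length + 1)).map (fun i => decide (c.drop i = (c.drop i).reverse))

def palindromes_till_the_end_alt (array : List String) : List (List Bool) × List (List Bool) :=
  (array.map (fun w => palMask w.toList), array.map (fun w => palMask w.toList.reverse))

-- ===== PRECONDITION & SPEC =====
def Spec_palindromes_till_the_end (array : List String) (out : List (List Bool) × List (List Bool)) : Prop := out = palindromes_till_the_end_alt array
instance (array : List String) (out : List (List Bool) × List (List Bool)) : Decidable (Spec_palindromes_till_the_end array out) := by unfold Spec_palindromes_till_the_end; infer_instance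

-- ===== CLAIM (what is proved, stated in full; the proofs are below) =====
def Claim_equal_palindromes_till_the_end : Prop := ∀ (array : List String), Dom_palindromes_till_the_end array → Spec_palindromes_till_the_end array (palindromes_till_the_end array)

-- ===== LEMMAS AND PROOFS =====

theorem manExtend_ge (c : List Char) (off pos r : Int) : r ≤ manExtend c off pos r := by
  fun_induction manExtend with
  | case1 r h ih => omega
  | case2 r h => omega

theorem manExtend_not_ok (c : List Char) (off pos r : Int) :
    ¬ mOk c off pos (manExtend c off pos r) := by
  fun_induction manExtend with
  | case1 r h ih => exact ih
  | case2 r h => exact h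

theorem manExtend_ok_of_lt (c : List Char) (off pos r : Int) :
    ∀ s, r ≤ s → s < manExtend c off pos r → mOk c off pos s := by
  fun_induction manExtend with
  | case1 r h ih =>
      intro s hs1 hs2
      rcases eq_or_lt_of_le hs1 with rfl | hlt
      · exact h
      · exact ih s (by omega) hs2
  | case2 r h => intro s hs1 hs2; omega

theorem manExtend_step (c : List Char) (off pos r : Int) (h : mOk c off pos r) :
    manExtend c off pos r = manExtend c off pos (r + 1) := by
  rw [manExtend.eq_def, if_pos h]

theorem manExtend_congr (c : List Char) (off pos : Int) (a b : Int)
    (hab : a ≤ b) (h : ∀ s, a ≤ s → s < b → mOk c off pos s) :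
    manExtend c off pos a = manExtend c off pos b := by
  obtain ⟨k, hk⟩ : ∃ k : Nat, b = a + k := ⟨(b - a).toNat, by omega⟩
  subst hk
  clear hab
  induction k generalizing a with
  | zero => norm_num
  | succ m ih =>
      rw [manExtend_step c off pos a (h a le_rfl (by omega))]
      rw [ih (a + 1) (fun s h1 h2 => h s (by omega) (by omega))]
      congr 1
      push_cast
      ring

-- the maximal radius at a center: what the while loop computes when started fresh
def Rmax (c : List Char) (off pos : Int) : Int := manExtend c off pos (1 - off) - 1

theorem Rmax_ge (c : List Char) (off pos : Int) : -off ≤ Rmax c off pos := by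
  have := manExtend_ge c off pos (1 - off); unfold Rmax; omega

theorem prefix_ok (c : List Char) (off pos : Int) :
    ∀ r, 1 - off ≤ r → r ≤ Rmax c off pos → mOk c off pos r := by
  intro r h1 h2
  exact manExtend_ok_of_lt c off pos (1 - off) r h1 (by unfold Rmax at h2; omega)

theorem Rmax_le (c : List Char) (off pos : Int) (hoff : off = 0 ∨ off = 1)
    (hpos : pos < (c.length : Int)) :
    pos + Rmax c off pos ≤ (c.length : Int) - 1 := by
  have hge := Rmax_ge c off pos
  by_cases h : 1 - off ≤ Rmax c off pos
  · have := prefix_ok c off pos (Rmax c off pos) h le_rfl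
    obtain ⟨-, h2, -⟩ := this; omega
  · omega

theorem mark_nonneg (c : List Char) (off pos : Int) (h0 : 0 ≤ pos) :
    0 ≤ pos - off - Rmax c off pos := by
  have hge := Rmax_ge c off pos
  by_cases h : 1 - off ≤ Rmax c off pos
  · have := prefix_ok c off pos (Rmax c off pos) h le_rfl
    obtain ⟨h1, -, -⟩ := this; omega
  · omega

-- inside the maximal palindrome around pc, characters reflect across the center
theorem reflect (c : List Char) (off pc : Int) (hoff : off = 0 ∨ off = 1) :
    ∀ u : Int, pc - off - Rmax c off pc ≤ u → u ≤ pc + Rmax c off pc →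
      PySem.List.pyGet? c u = PySem.List.pyGet? c (2 * pc - off - u) := by
  have hoffb : 0 ≤ off ∧ off ≤ 1 := by rcases hoff with rfl | rfl <;> omega
  have hRge := Rmax_ge c off pc
  intro u h1 h2
  by_cases hu : pc ≤ u
  · by_cases hr : 1 - off ≤ u - pc
    · have hok := prefix_ok c off pc (u - pc) hr (by omega)
      obtain ⟨-, -, he⟩ := hok
      have e1 : pc - off - (u - pc) = 2 * pc - off - u := by ring
      have e2 : pc + (u - pc) = u := by ring
      rw [e1, e2] at he
      exact he.symm
    · have hup : u = pc ∧ off = 0 := by omega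
      obtain ⟨rfl, rfl⟩ := hup
      congr 1
      ring
  · have hok := prefix_ok c off pc (pc - off - u) (by omega) (by omega)
    obtain ⟨-, -, he⟩ := hok
    have e1 : pc - off - (pc - off - u) = u := by ring
    have e2 : pc + (pc - off - u) = 2 * pc - off - u := by ring
    rw [e1, e2] at he
    exact he

-- the mirror argument: matches around the mirror center give matches around pos
theorem mirror_ok (c : List Char) (off pc pos : Int) (hoff : off = 0 ∨ off = 1)
    (hpc : pc < pos) (hpos : pos ≤ pc + Rmax c off pc) :
    ∀ r : Int, 1 - off ≤ r → r ≤ Rmax c off (2 * pc - pos) →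
      r ≤ pc + Rmax c off pc - pos → mOk c off pos r := by
  have hoffb : 0 ≤ off ∧ off ≤ 1 := by rcases hoff with rfl | rfl <;> omega
  have hRgem := Rmax_ge c off (2 * pc - pos)
  have hokR := prefix_ok c off pc (Rmax c off pc) (by omega) le_rfl
  obtain ⟨hL, hRt, -⟩ := hokR
  intro r hr1 hr2 hr3
  have hu2 := reflect c off pc hoff (2 * pc - pos + r) (by omega) (by omega)
  have hu1 := reflect c off pc hoff (2 * pc - pos - off - r) (by omega) (by omega)
  have hokm := prefix_ok c off (2 * pc - pos) r hr1 hr2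
  obtain ⟨hm1, hm2, hm3⟩ := hokm
  refine ⟨by omega, by omega, ?_⟩
  have e2 : 2 * pc - off - (2 * pc - pos + r) = pos - off - r := by ring
  have e1 : 2 * pc - off - (2 * pc - pos - off - r) = pos + r := by ring
  rw [e2] at hu2
  rw [e1] at hu1
  calc PySem.List.pyGet? c (pos - off - r)
      = PySem.List.pyGet? c (2 * pc - pos + r) := hu2.symm
    _ = PySem.List.pyGet? c (2 * pc - pos - off - r) := hm3.symm
    _ = PySem.List.pyGet? c (pos + r) := hu1

-- which result indices manacher has set to True after processing positions < pos
def MarkedAt (c : List Char) (off : Int) (pos : Nat) (i : Nat) : Prop :=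
  i = c.length ∨ ∃ p : Nat, p < pos ∧ (p : Int) + Rmax c off p = (c.length : Int) - 1 ∧
    (i : Int) = (p : Int) - off - Rmax c off p

def MInv (c : List Char) (off : Int) (pos : Nat) (s : MState) : Prop :=
  s.cache.length = c.length ∧
  s.result.length = c.length + 1 ∧
  (∀ p : Nat, p < pos → s.cache[p]? = some (Rmax c off p)) ∧
  ((s.right = -1 ∧ s.left = 0) ∨ ∃ pc : Nat, pc < pos ∧ pc < c.length ∧
      s.right = (pc : Int) + Rmax c off pc ∧ s.left = (pc : Int) - off - Rmax c off pc) ∧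
  (∀ p : Nat, p < pos → (p : Int) + Rmax c off p ≤ s.right) ∧
  (∀ i : Nat, i ≤ c.length → (s.result[i]? = some true ↔ MarkedAt c off pos i))

theorem inv_step (c : List Char) (off : Int) (hoff : off = 0 ∨ off = 1) (pos : Nat)
    (hpos : pos < c.length) (s : MState) (hInv : MInv c off pos s) :
    MInv c off (pos + 1) (manStep c off pos s) := by
  have hoffb : 0 ≤ off ∧ off ≤ 1 := by rcases hoff with rfl | rfl <;> omega
  obtain ⟨hclen, hrlen, hcache, hlr, hbound, hres⟩ := hInv
  have hradius :
      manExtend c off pos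
        (if (pos : Int) > s.right then 1 - off
         else min (PySem.List.pyGetD s.cache (s.left + s.right - ((pos : Int) - off)) 0 + 1)
                  (s.right - (pos : Int) + 1)) - 1 = Rmax c off (pos : Int) := by
    by_cases hgt : (pos : Int) > s.right
    · rw [if_pos hgt]; rfl
    · rw [if_neg hgt]
      rcases hlr with ⟨hr1, -⟩ | ⟨pc, hpcpos, hpcn, hr, hl⟩
      · exfalso; omega
      · have hRpc1 : 1 ≤ Rmax c off pc := by omega
        obtain ⟨hL0, hRtn, -⟩ := prefix_ok c off pc (Rmax c off pc) (by omega) le_rfl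
        have hm : s.left + s.right - ((pos : Int) - off) = 2 * (pc : Int) - pos := by
          rw [hl, hr]; ring
        have hmm : ((2 * pc - pos : Nat) : Int) = 2 * (pc : Int) - pos := by omega
        have hget : PySem.List.pyGetD s.cache (s.left + s.right - ((pos : Int) - off)) 0
            = Rmax c off (2 * (pc : Int) - pos) := by
          rw [hm, ← hmm, PySem.List.pyGetD_natCast, List.getD_eq_getElem?_getD,
            hcache (2 * pc - pos) (by omega)]
          simp [hmm]
        have hRm := Rmax_ge c off (2 * (pc : Int) - pos)
        have hmin : min (Rmax c off (2 * (pc : Int) - pos) + 1) (s.right - (pos : Int) + 1)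
            = min (Rmax c off (2 * (pc : Int) - pos)) (s.right - (pos : Int)) + 1 := by omega
        have hall : ∀ r, 1 - off ≤ r →
            r < min (Rmax c off (2 * (pc : Int) - pos)) (s.right - (pos : Int)) + 1 →
            mOk c off pos r := by
          intro r h1 h2
          exact mirror_ok c off pc pos hoff (by omega) (by omega) r h1
            (by omega) (by omega)
        have hcg := manExtend_congr c off pos (1 - off)
          (min (Rmax c off (2 * (pc : Int) - pos)) (s.right - (pos : Int)) + 1) (by omega) hall
        have hEq : manExtend c off pos
            (min (PySem.List.pyGetD s.cache (s.left + s.right - ((pos : Int) - off)) 0 + 1)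
                 (s.right - (pos : Int) + 1))
            = manExtend c off pos (1 - off) := by
          rw [hget, hmin]; exact hcg.symm
        rw [hEq]
        rfl
  have hRge := Rmax_ge c off (pos : Int)
  have hRle := Rmax_le c off (pos : Int) hoff (by omega)
  have hi0 := mark_nonneg c off (pos : Int) (by omega)
  have hcache' : ∀ p : Nat, p < pos + 1 →
      (PySem.List.pySetD s.cache (pos : Int) (Rmax c off (pos : Int)))[p]?
        = some (Rmax c off (p : Int)) := by
    intro p hp
    rw [PySem.List.pySetD_natCast]
    rcases Nat.lt_succ_iff_lt_or_eq.mp hp with hlt | rfl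
    · rw [List.getElem?_set, if_neg (by omega)]; exact hcache p hlt
    · rw [List.getElem?_set, if_pos rfl, if_pos (by omega)]
  have hclen' : (PySem.List.pySetD s.cache (pos : Int) (Rmax c off (pos : Int))).length
      = c.length := by rw [PySem.List.pySetD_natCast]; simp [hclen]
  have hmark_mono : ∀ i : Nat, ((pos : Int) + Rmax c off (pos : Int) ≠ (c.length : Int) - 1 ∨
        (i : Int) ≠ (pos : Int) - off - Rmax c off (pos : Int)) →
      (MarkedAt c off pos i ↔ MarkedAt c off (pos + 1) i) := by
    intro i hside
    constructor
    · rintro (h | ⟨p, hp, hsum, hpi⟩)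
      · exact Or.inl h
      · exact Or.inr ⟨p, by omega, hsum, hpi⟩
    · rintro (h | ⟨p, hp, hsum, hpi⟩)
      · exact Or.inl h
      · refine Or.inr ⟨p, ?_, hsum, hpi⟩
        rcases Nat.lt_succ_iff_lt_or_eq.mp hp with h' | rfl
        · exact h'
        · rcases hside with h' | h' <;> [exact absurd hsum h'; exact absurd hpi h']
  have hres' : ∀ i : Nat, i ≤ c.length →
      ((if (pos : Int) + Rmax c off (pos : Int) = (c.length : Int) - 1 then
          PySem.List.pySetD s.result ((pos : Int) - off - Rmax c off (pos : Int)) true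
        else s.result)[i]? = some true ↔ MarkedAt c off (pos + 1) i) := by
    intro i hi
    by_cases hend : (pos : Int) + Rmax c off (pos : Int) = (c.length : Int) - 1
    · rw [if_pos hend, PySem.List.pySetD_of_nonneg s.result true hi0]
      have hi0len : ((pos : Int) - off - Rmax c off (pos : Int)).toNat < s.result.length := by
        omega
      by_cases hii : i = ((pos : Int) - off - Rmax c off (pos : Int)).toNat
      · subst hii
        rw [List.getElem?_set, if_pos rfl, if_pos hi0len]
        exact ⟨fun _ => Or.inr ⟨pos, by omega, hend, by omega⟩, fun _ => rfl⟩
      · rw [List.getElem?_set, if_neg (by omega), hres i hi]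
        exact hmark_mono i (Or.inr (by omega))
    · rw [if_neg hend, hres i hi]
      exact hmark_mono i (Or.inl hend)
  have hrlen' : (if (pos : Int) + Rmax c off (pos : Int) = (c.length : Int) - 1 then
        PySem.List.pySetD s.result ((pos : Int) - off - Rmax c off (pos : Int)) true
      else s.result).length = c.length + 1 := by
    by_cases hend : (pos : Int) + Rmax c off (pos : Int) = (c.length : Int) - 1
    · rw [if_pos hend, PySem.List.pySetD_of_nonneg s.result true hi0]; simp [hrlen]
    · rw [if_neg hend]; exact hrlen
  unfold manStep
  dsimp only
  rw [hradius]
  by_cases hupd : (pos : Int) + Rmax c off (pos : Int) > s.right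
  · rw [if_pos hupd]
    refine ⟨hclen', hrlen', hcache', Or.inr ⟨pos, by omega, by omega, rfl, rfl⟩, ?_, hres'⟩
    intro p hp
    dsimp only
    rcases Nat.lt_succ_iff_lt_or_eq.mp hp with h' | rfl
    · have := hbound p h'
      omega
    · omega
  · rw [if_neg hupd]
    refine ⟨hclen', hrlen', hcache', ?_, ?_, hres'⟩
    · rcases hlr with h | ⟨pc, h1, h2, h3, h4⟩
      · exact Or.inl h
      · exact Or.inr ⟨pc, by omega, h2, h3, h4⟩
    · intro p hp
      dsimp only
      rcases Nat.lt_succ_iff_lt_or_eq.mp hp with h' | rfl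
      · exact hbound p h'
      · omega

theorem inv_init (c : List Char) (off : Int) :
    MInv c off 0 ⟨0, -1, List.replicate c.length 0,
      PySem.List.pySetD (List.replicate (c.length + 1) false) (-1) true⟩ := by
  have hres : PySem.List.pySetD (List.replicate (c.length + 1) false) (-1) true
      = (List.replicate (c.length + 1) false).set c.length true := by
    simp [PySem.List.pySetD, PySem.List.pySet?, PySem.List.pyIdx?]
  refine ⟨by simp, by simp [hres], fun p hp => absurd hp (by omega), Or.inl ⟨rfl, rfl⟩,
    fun p hp => absurd hp (by omega), ?_⟩
  intro i hi
  show ((PySem.List.pySetD (List.replicate (c.length + 1) false) (-1) true)[i]? = some true ↔ _)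
  rw [hres, List.getElem?_set]
  rcases Nat.eq_or_lt_of_le hi with rfl | hlt
  · simp [MarkedAt]
  · have hne : i ≠ c.length := by omega
    simp [Ne.symm hne, hne, List.getElem?_replicate, MarkedAt]

theorem manGo_keeps (c : List Char) (off : Int) (hoff : off = 0 ∨ off = 1) :
    ∀ (k pos : Nat) (s : MState), c.length = pos + k → MInv c off pos s →
      MInv c off c.length (manGo c off pos s) := by
  intro k
  induction k with
  | zero =>
      intro pos s hlen hInv
      rw [manGo.eq_def]
      simp only [show ¬ pos < c.length by omega, if_false]
      have : pos = c.length := by omega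
      subst this; exact hInv
  | succ m ih =>
      intro pos s hlen hInv
      rw [manGo.eq_def]
      simp only [show pos < c.length by omega, if_true]
      exact ih (pos + 1) _ (by omega) (inv_step c off hoff pos (by omega) s hInv)

theorem manacher_char (c : List Char) (off : Int) (hoff : off = 0 ∨ off = 1) :
    (manacher c off).length = c.length + 1 ∧
    ∀ i : Nat, i ≤ c.length →
      ((manacher c off)[i]? = some true ↔ MarkedAt c off c.length i) := by
  have h := manGo_keeps c off hoff c.length 0
      ⟨0, -1, List.replicate c.length 0,
        PySem.List.pySetD (List.replicate (c.length + 1) false) (-1) true⟩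
      (by omega) (inv_init c off)
  obtain ⟨-, h2, -, -, -, h6⟩ := h
  unfold manacher
  exact ⟨h2, h6⟩

-- a list drop is a palindrome iff characters pair symmetrically (Int-indexed, matching mOk)
theorem pal_iff (c : List Char) (i : Nat) (hi : i ≤ c.length) :
    (c.drop i = (c.drop i).reverse) ↔
    ∀ u : Int, (i : Int) ≤ u → u < (c.length : Int) →
      PySem.List.pyGet? c u = PySem.List.pyGet? c ((i : Int) + (c.length : Int) - 1 - u) := by
  constructor
  · intro h u h1 h2
    obtain ⟨j, rfl⟩ : ∃ j : Nat, u = (j : Int) := ⟨u.toNat, by omega⟩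
    have hj1 : i ≤ j := by omega
    have hj2 : j < c.length := by omega
    have e : (i : Int) + c.length - 1 - j = ((i + c.length - 1 - j : Nat) : Int) := by omega
    rw [e, PySem.List.pyGet?_natCast, PySem.List.pyGet?_natCast]
    have hk : j - i < (c.drop i).length := by simp; omega
    have s1 : getElem? c j = (c.drop i)[j - i]? := by rw [List.getElem?_drop]; congr 1; omega
    have s2 : (c.drop i).reverse[j - i]? = (c.drop i)[(c.drop i).length - 1 - (j - i)]? :=
      List.getElem?_reverse hk
    have s3 : ((c.drop i)[(c.drop i).length - 1 - (j - i)]? : Option Char)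
        = getElem? c (i + c.length - 1 - j) := by
      rw [List.getElem?_drop]; congr 1; simp; omega
    rw [s1]
    conv_lhs => rw [h]
    rw [s2, s3]
  · intro h
    apply List.ext_getElem?
    intro k
    by_cases hk : k < c.length - i
    · rw [List.getElem?_drop, List.getElem?_reverse (by simp; omega), List.getElem?_drop]
      have h1 := h ((i : Int) + k) (by omega) (by omega)
      rw [show ((i : Int) + k) = ((i + k : Nat) : Int) by push_cast; ring] at h1
      rw [PySem.List.pyGet?_natCast] at h1
      have e : (i : Int) + c.length - 1 - ((i + k : Nat) : Int)
          = ((i + ((c.drop i).length - 1 - k) : Nat) : Int) := by simp; omega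
      rw [e, PySem.List.pyGet?_natCast] at h1
      exact h1
    · rw [List.getElem?_eq_none (by simp; omega), List.getElem?_eq_none (by simp; omega)]

theorem marked_pal (c : List Char) (off : Int) (hoff : off = 0 ∨ off = 1) (i p : Nat)
    (hsum : (p : Int) + Rmax c off p = (c.length : Int) - 1)
    (hi : (i : Int) = (p : Int) - off - Rmax c off p) :
    c.drop i = (c.drop i).reverse := by
  have hoffb : 0 ≤ off ∧ off ≤ 1 := by rcases hoff with rfl | rfl <;> omega
  have hRge := Rmax_ge c off p
  have hi' : i ≤ c.length := by omega
  rw [pal_iff c i hi']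
  intro u h1 h2
  have hr := reflect c off p hoff u (by omega) (by omega)
  rw [show 2 * (p : Int) - off - u = (i : Int) + c.length - 1 - u by omega] at hr
  exact hr

theorem pal_marked_off (c : List Char) (off : Int) (hoff : off = 0 ∨ off = 1) (i p : Nat)
    (hi : i < c.length) (hp : p < c.length)
    (hgeom : (i : Int) + c.length - 1 = 2 * p - off)
    (h : c.drop i = (c.drop i).reverse) :
    (p : Int) + Rmax c off p = (c.length : Int) - 1 ∧
      (i : Int) = (p : Int) - off - Rmax c off p := by
  have hoffb : 0 ≤ off ∧ off ≤ 1 := by rcases hoff with rfl | rfl <;> omega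
  set t : Int := (c.length : Int) - 1 - p with ht
  have ht0 : 0 ≤ t := by omega
  have hall : ∀ r : Int, 1 - off ≤ r → r < t + 1 → mOk c off p r := by
    intro r h1 h2
    refine ⟨by omega, by omega, ?_⟩
    have hu := (pal_iff c i (by omega)).mp h ((p : Int) - off - r) (by omega) (by omega)
    rw [show (i : Int) + c.length - 1 - ((p : Int) - off - r) = (p : Int) + r by omega] at hu
    exact hu
  have hEb : manExtend c off p (1 - off) = manExtend c off p (t + 1) :=
    manExtend_congr c off p (1 - off) (t + 1) (by omega) hall
  have hge := manExtend_ge c off p (t + 1)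
  have hRget : t ≤ Rmax c off p := by unfold Rmax; rw [hEb]; omega
  have hRle : Rmax c off p ≤ t := by
    by_cases hc : 1 - off ≤ Rmax c off p
    · obtain ⟨-, h2, -⟩ := prefix_ok c off p _ hc le_rfl; omega
    · have := Rmax_ge c off p; omega
  constructor <;> omega

theorem pal_marked (c : List Char) (i : Nat) (hi : i < c.length)
    (h : c.drop i = (c.drop i).reverse) :
    MarkedAt c 0 c.length i ∨ MarkedAt c 1 c.length i := by
  rcases Nat.even_or_odd (c.length - i) with he | ho
  · obtain ⟨t, ht⟩ := he
    have ht1 : 1 ≤ t := by omega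
    have hp : i + (t - 1) + 1 < c.length := by omega
    have := pal_marked_off c 1 (Or.inr rfl) i (i + (t - 1) + 1) hi hp (by push_cast; omega) h
    exact Or.inr (Or.inr ⟨i + (t - 1) + 1, by omega, this.1, this.2⟩)
  · obtain ⟨t, ht⟩ := ho
    have hp : i + t < c.length := by omega
    have := pal_marked_off c 0 (Or.inl rfl) i (i + t) hi hp (by push_cast; omega) h
    exact Or.inl (Or.inr ⟨i + t, by omega, this.1, this.2⟩)

theorem combined_eq (c : List Char) :
    ((manacher c 0).zip (manacher c 1)).map (fun x => x.1 || x.2) = palMask c := by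
  obtain ⟨hl0, hch0⟩ := manacher_char c 0 (Or.inl rfl)
  obtain ⟨hl1, hch1⟩ := manacher_char c 1 (Or.inr rfl)
  apply List.ext_getElem
  · simp [palMask, hl0, hl1]
  intro k hk1 hk2
  have hk : k ≤ c.length := by simp [hl0, hl1] at hk1; omega
  have h0 : (manacher c 0)[k]'(by omega) = true ↔ MarkedAt c 0 c.length k := by
    rw [← hch0 k hk, List.getElem?_eq_getElem (by omega)]
    simp
  have h1 : (manacher c 1)[k]'(by omega) = true ↔ MarkedAt c 1 c.length k := by
    rw [← hch1 k hk, List.getElem?_eq_getElem (by omega)]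
    simp
  rw [List.getElem_map, List.getElem_zip]
  have hR : (palMask c)[k]'(by simpa [palMask, hl0, hl1] using hk1)
      = decide (c.drop k = (c.drop k).reverse) := by
    simp [palMask]
  rw [hR, Bool.eq_iff_iff]
  simp only [Bool.or_eq_true, decide_eq_true_eq]
  constructor
  · rintro (h | h)
    · rcases h0.mp h with hkn | ⟨p, hp, hsum, hpi⟩
      · simp [hkn, List.drop_length]
      · exact marked_pal c 0 (Or.inl rfl) k p hsum hpi
    · rcases h1.mp h with hkn | ⟨p, hp, hsum, hpi⟩
      · simp [hkn, List.drop_length]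
      · exact marked_pal c 1 (Or.inr rfl) k p hsum hpi
  · intro hpal
    rcases Nat.eq_or_lt_of_le hk with heq | hlt
    · exact Or.inl (h0.mpr (Or.inl heq))
    · rcases pal_marked c k hlt hpal with hm | hm
      · exact Or.inl (h0.mpr hm)
      · exact Or.inr (h1.mpr hm)

-- ===== VERDICT (by name: the statement is the Claim_ definition above) =====
theorem palindromes_till_the_end_spec : Claim_equal_palindromes_till_the_end := by
  intro array _
  unfold Spec_palindromes_till_the_end palindromes_till_the_end palindromes_till_the_end_alt
  refine Prod.ext ?_ ?_ <;> simp only [] <;>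
    exact List.map_congr_left (fun w _ => combined_eq _)
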